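-- pv_equiv track=rewrite | github.com/seidkrsic/marko_python | cas9/problem4.py | dodavanje_nule
-- ===== SOURCE A (Python) =====
-- def dodavanje_nule(n):
--
--     if n == 0:
--         return ''
--     else:
--         if (n % 10) %2 != 0:
--             return dodavanje_nule(n // 10) + f"{n % 10}0"
--         else:
--             return dodavanje_nule(n // 10) + f"{n % 10}"
-- ===== SOURCE B (Python) =====
-- def dodavanje_nule(n):
--     pieces = []
--     while n > 0:
--         d = n % 10
--         pieces.append(f"{d}0" if d % 2 != 0 else f"{d}")
--         n //= 10
--     return ''.join(reversed(pieces))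
-- ===== Notes on version B (the rewrite author's own statement) =====
-- stated objective: alternative
-- what changed: Replaces A's recursion (recursive call then append digit piece) with an iterative while-loop collecting digit pieces least-significant first into a list, reversed and joined at the end.
import Mathlib
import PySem

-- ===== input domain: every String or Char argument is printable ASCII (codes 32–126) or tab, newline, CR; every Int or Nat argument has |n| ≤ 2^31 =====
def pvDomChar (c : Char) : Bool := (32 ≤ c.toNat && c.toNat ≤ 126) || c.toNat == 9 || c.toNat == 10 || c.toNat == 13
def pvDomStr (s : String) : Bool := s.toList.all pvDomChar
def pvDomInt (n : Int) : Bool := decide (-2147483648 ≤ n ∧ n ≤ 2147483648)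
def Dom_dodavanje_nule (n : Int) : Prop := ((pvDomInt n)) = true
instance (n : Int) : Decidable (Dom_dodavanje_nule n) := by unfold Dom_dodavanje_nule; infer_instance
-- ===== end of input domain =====

-- B replaces A's recursion by an iterative digit loop (LSB-first pieces list, reversed and joined); alternative decomposition, same cost.
-- For n < 0 the Python A never returns (RecursionError); Pre_ restricts to n ≥ 0 and both ports read the digits of n.toNat
-- (for n ≥ 0, Python's n // 10 and n % 10 are n.toNat / 10 and n.toNat % 10). Both helpers carry a fuel argument (init. m itself,
-- enough since m / 10 < m) only to make the recursion structural; with m ≤ fuel the fuel branch is never taken.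

-- ===== PORT A =====
def dodavanje_nuleGo (fuel m : Nat) : String :=
  match fuel with
  | 0 => ""
  | f + 1 =>
    if m = 0 then ""
    else
      if (m % 10) % 2 ≠ 0 then
        dodavanje_nuleGo f (m / 10) ++ (PySem.Int.toStr (↑(m % 10)) ++ "0")
      else
        dodavanje_nuleGo f (m / 10) ++ PySem.Int.toStr (↑(m % 10))

def dodavanje_nule (n : Int) : String := dodavanje_nuleGo n.toNat n.toNat

-- ===== PORT B =====
-- iterative loop over the decimal digits: append the piece for the last digit, then drop it; reverse and join at the end
def dodavanje_nule_altLoop (fuel m : Nat) (pieces : List String) : List String :=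
  match fuel with
  | 0 => pieces
  | f + 1 =>
    if m = 0 then pieces
    else
      let d := m % 10
      dodavanje_nule_altLoop f (m / 10)
        (pieces ++ [if d % 2 ≠ 0 then PySem.Int.toStr (↑d) ++ "0" else PySem.Int.toStr (↑d)])

def dodavanje_nule_alt (n : Int) : String :=
  PySem.Str.join "" (dodavanje_nule_altLoop n.toNat n.toNat []).reverse

-- ===== PRECONDITION & SPEC =====
-- Pre_ excludes n < 0, where the Python A raises RecursionError (n // 10 stabilises at -1) and so never returns.
def Pre_dodavanje_nule (n : Int) : Prop := 0 ≤ n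
instance (n : Int) : Decidable (Pre_dodavanje_nule n) := by unfold Pre_dodavanje_nule; infer_instance
def pvWitness_dodavanje_nule : Int := (135)

def Spec_dodavanje_nule (n : Int) (out : String) : Prop := out = dodavanje_nule_alt n
instance (n : Int) (out : String) : Decidable (Spec_dodavanje_nule n out) := by unfold Spec_dodavanje_nule; infer_instance

-- ===== CLAIM (what is proved, stated in full; the proofs are below) =====
def Claim_equal_dodavanje_nule : Prop := ∀ (n : Int), Dom_dodavanje_nule n → Pre_dodavanje_nule n → Spec_dodavanje_nule n (dodavanje_nule n)

-- ===== LEMMAS AND PROOFS =====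
theorem altLoop_acc (fuel : Nat) : ∀ (m : Nat) (acc : List String),
    dodavanje_nule_altLoop fuel m acc = acc ++ dodavanje_nule_altLoop fuel m [] := by
  induction fuel with
  | zero => intro m acc; simp [dodavanje_nule_altLoop]
  | succ f ih =>
    intro m acc
    by_cases h : m = 0
    · simp [dodavanje_nule_altLoop, h]
    · rw [dodavanje_nule_altLoop, dodavanje_nule_altLoop]
      simp only [if_neg h]
      rw [ih (m / 10)]
      simp only [List.nil_append]
      rw [ih (m / 10) ([_])]
      simp

theorem flatten_intersperse_nil (l : List (List Char)) :
    (List.intersperse ([]:List Char) l).flatten = l.flatten := by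
  induction l with
  | nil => rfl
  | cons a t ih =>
    cases t with
    | nil => rfl
    | cons b t2 =>
      have h2 : List.intersperse ([]:List Char) (a :: b :: t2)
          = a :: [] :: List.intersperse [] (b :: t2) := rfl
      rw [h2]
      simp only [List.flatten_cons] at ih ⊢
      rw [ih]
      simp

theorem join_append_singleton (l : List String) (p : String) :
    PySem.Str.join "" (l ++ [p]) = PySem.Str.join "" l ++ p := by
  simp [PySem.Str.join, PySem.Chars.join, List.intercalate, flatten_intersperse_nil]

theorem go_eq (fuel : Nat) : ∀ (m : Nat), m ≤ fuel →
    dodavanje_nuleGo fuel m = PySem.Str.join "" (dodavanje_nule_altLoop fuel m []).reverse := by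
  induction fuel with
  | zero =>
    intro m _
    rfl
  | succ f ih =>
    intro m hm
    by_cases h : m = 0
    · rw [dodavanje_nuleGo, dodavanje_nule_altLoop]
      simp only [if_pos h]
      rfl
    · rw [dodavanje_nuleGo, dodavanje_nule_altLoop]
      simp only [if_neg h]
      have hdiv : m / 10 ≤ f := by
        have := Nat.div_lt_self (Nat.pos_of_ne_zero h) (by omega : 1 < 10)
        omega
      rw [altLoop_acc, List.nil_append, List.reverse_append, List.reverse_singleton,
          join_append_singleton, ← ih (m / 10) hdiv]
      split <;> rfl

-- ===== VERDICT (by name: the statement is the Claim_ definition above) =====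
theorem dodavanje_nule_spec : Claim_equal_dodavanje_nule := by
  intro n _ _
  unfold Spec_dodavanje_nule dodavanje_nule dodavanje_nule_alt
  exact go_eq n.toNat n.toNat (le_refl _)
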